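-- pv_equiv track=rewrite | github.com/RodrigoSantosGoncalves1991/Desafios-do-Hackerrank---ProjectEuler- | Project Euler 11 Largest product in a grid/Project Euler 11 Largest product in a grid.py | LargestProductGrid
-- ===== SOURCE A (Python) =====
-- def biggestProductSeries(number, k):
--     numberString = number
--     counterProduct = 0
--     iCounter = 0
--     pivot = iCounter
--     product = 1
--     maxProduct = 0
--     for i in numberString:
--         if (i == 0):
--             counterProduct = 0
--             product = 1
--             iCounter = iCounter + 1
--             continue
--         if (counterProduct == 0):
--             pivot = iCounter
--         if (counterProduct < k):
--             product = product * i
--             counterProduct = counterProduct + 1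
--             if (counterProduct == k):
--                 if (product > maxProduct):
--                     maxProduct = product
--         else:
--             product = product // numberString[pivot]
--             product = product * i
--             pivot = pivot + 1
--             if (product > maxProduct):
--                 maxProduct = product
--         iCounter = iCounter + 1
--     return maxProduct
--
-- def LargestProductGrid(searchSpace):
--     product = 0
--     for space in searchSpace:
--         if (len(space) >= 4):
--             value = biggestProductSeries(space, 4)
--             if (value > product):
--                 product = value
--     return product
-- ===== SOURCE B (Python) =====
-- def LargestProductGrid(searchSpace):
--     best = 0
--     for space in searchSpace:
--         for a, b, c, d in zip(space, space[1:], space[2:], space[3:]):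
--             p = a * b * c * d
--             if p > best:
--                 best = p
--     return best
-- ===== Notes on version B (the rewrite author's own statement) =====
-- stated objective: simpler
-- what changed: Replaced the sliding-window state machine (running product maintained by multiplying in the new element and floor-dividing out the pivot element, with zero-reset bookkeeping) by directly recomputing the product of every 4 consecutive entries via zip of shifted slices, tracking one running maximum.
import Mathlib
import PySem

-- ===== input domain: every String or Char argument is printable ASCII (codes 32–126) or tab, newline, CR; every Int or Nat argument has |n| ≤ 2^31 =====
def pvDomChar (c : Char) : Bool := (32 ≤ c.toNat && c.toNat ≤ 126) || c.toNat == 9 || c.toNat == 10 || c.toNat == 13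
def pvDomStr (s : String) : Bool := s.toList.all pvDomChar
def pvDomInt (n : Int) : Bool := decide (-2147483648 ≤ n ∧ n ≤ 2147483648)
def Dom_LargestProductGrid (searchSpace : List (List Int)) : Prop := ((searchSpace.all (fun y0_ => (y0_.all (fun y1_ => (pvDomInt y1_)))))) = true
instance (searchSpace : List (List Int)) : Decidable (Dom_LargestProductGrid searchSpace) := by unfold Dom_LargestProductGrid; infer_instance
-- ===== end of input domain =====

-- B replaces A's sliding-window state machine (running product updated by floor-dividing out the
-- departing pivot element, with zero-reset bookkeeping) by directly recomputing each 4-window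
-- product; objective: simpler. Equivalence is proved for all integer grids (no Pre_ needed).

-- ===== PORT A =====
-- State of biggestProductSeries's loop: counterProduct, iCounter, pivot, product, maxProduct.
structure BpsState where
  cp : Int
  ic : Int
  piv : Int
  prod : Int
  maxp : Int
deriving Repr, DecidableEq

def bpsStep (numberString : List Int) (k : Int) (st : BpsState) (i : Int) : BpsState :=
  if i = 0 then
    { st with cp := 0, prod := 1, ic := st.ic + 1 }
  else
    let st := if st.cp = 0 then { st with piv := st.ic } else st
    if st.cp < k then
      let prod := st.prod * i
      let cp := st.cp + 1
      let maxp := if cp = k then (if prod > st.maxp then prod else st.maxp) else st.maxp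
      { st with prod := prod, cp := cp, maxp := maxp, ic := st.ic + 1 }
    else
      -- numberString[pivot]: the pivot is always in range here (the equivalence proof below
      -- establishes this), so the `.getD 1` default is never used and Python never raises.
      let prod := PySem.Int.floordiv st.prod ((PySem.List.pyGet? numberString st.piv).getD 1)
      let prod := prod * i
      let maxp := if prod > st.maxp then prod else st.maxp
      { st with prod := prod, piv := st.piv + 1, maxp := maxp, ic := st.ic + 1 }

def biggestProductSeries (number : List Int) (k : Int) : Int :=
  (number.foldl (bpsStep number k) ⟨0, 0, 0, 1, 0⟩).maxp

def LargestProductGrid (searchSpace : List (List Int)) : Int :=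
  searchSpace.foldl (fun product space =>
    if (space.length : Int) ≥ 4 then
      let value := biggestProductSeries space 4
      if value > product then value else product
    else product) 0

-- ===== PORT B =====
-- `for a, b, c, d in zip(space, space[1:], space[2:], space[3:])`: iterate over quadruples of
-- consecutive elements.
def rowBest : List Int → Int → Int
  | a :: b :: c :: d :: t, best =>
      let p := a * b * c * d
      rowBest (b :: c :: d :: t) (if p > best then p else best)
  | _, best => best

def LargestProductGrid_alt (searchSpace : List (List Int)) : Int :=
  searchSpace.foldl (fun best space => rowBest space best) 0

-- ===== PRECONDITION & SPEC =====
def Spec_LargestProductGrid (searchSpace : List (List Int)) (out : Int) : Prop := out = LargestProductGrid_alt searchSpace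
instance (searchSpace : List (List Int)) (out : Int) : Decidable (Spec_LargestProductGrid searchSpace out) := by unfold Spec_LargestProductGrid; infer_instance

-- ===== CLAIM (what is proved, stated in full; the proofs are below) =====
def Claim_equal_LargestProductGrid : Prop := ∀ (searchSpace : List (List Int)), Dom_LargestProductGrid searchSpace → Spec_LargestProductGrid searchSpace (LargestProductGrid searchSpace)

-- ===== LEMMAS AND PROOFS =====

-- Products of all 4-windows of a list, in order.
def allWins : List Int → List Int
  | a :: b :: c :: d :: t => a * b * c * d :: allWins (b :: c :: d :: t)
  | _ => []

-- Products of the 4-windows formed while scanning `s` with pending window `w` (|w| ≤ 4).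
def winsFrom (w : List Int) : List Int → List Int
  | [] => []
  | i :: s =>
    let w' := (if w.length = 4 then w.tail else w) ++ [i]
    (if w'.length = 4 then [w'.prod] else []) ++ winsFrom w' s

-- Same, but A-style: reset the pending window on a zero (only zero-free windows are emitted).
def extWins (w : List Int) : List Int → List Int
  | [] => []
  | i :: s =>
    if i = 0 then extWins [] s
    else
      let w' := if w.length = 4 then w.tail ++ [i] else w ++ [i]
      (if w'.length = 4 then [w'.prod] else []) ++ extWins w' s

-- Maximal zero-free suffix.
def nzTail : List Int → List Int
  | [] => []
  | x :: t => if x = 0 ∨ (0 : Int) ∈ t then nzTail t else x :: t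

theorem nzTail_suffix (l : List Int) : nzTail l <:+ l := by
  induction l with
  | nil => simp [nzTail]
  | cons x t ih =>
    simp only [nzTail]
    split
    · exact ih.trans (List.suffix_cons x t)
    · exact List.suffix_rfl

theorem nzTail_nonzero (l : List Int) : ∀ x ∈ nzTail l, x ≠ 0 := by
  induction l with
  | nil => simp [nzTail]
  | cons x t ih =>
    simp only [nzTail]
    split
    · exact ih
    · rename_i h
      push_neg at h
      intro y hy
      rcases List.mem_cons.mp hy with rfl | hy
      · exact h.1
      · exact fun h0 => (h.2 (h0 ▸ hy)).elim

theorem nzTail_eq_self {l : List Int} (h : (0 : Int) ∉ l) : nzTail l = l := by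
  induction l with
  | nil => rfl
  | cons x t ih =>
    simp only [nzTail]
    rw [if_neg]
    push_neg
    constructor
    · intro h0; exact h (by simp [h0])
    · intro h0; exact h (by simp [h0])

theorem nzTail_append_nz {l : List Int} {i : Int} (hi : i ≠ 0) :
    nzTail (l ++ [i]) = nzTail l ++ [i] := by
  induction l with
  | nil => simp [nzTail, hi]
  | cons x t ih =>
    simp only [List.cons_append, nzTail, List.mem_append, List.mem_singleton]
    by_cases h : x = 0 ∨ (0 : Int) ∈ t
    · rw [if_pos, if_pos h, ih]
      rcases h with h | h
      · exact Or.inl h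
      · exact Or.inr (Or.inl h)
    · push_neg at h
      rw [if_neg, if_neg, List.cons_append]
      · push_neg; exact h
      · push_neg
        refine ⟨h.1, h.2, fun h0 => (hi h0.symm).elim⟩

theorem nzTail_append_zero (l : List Int) : nzTail (l ++ [0]) = [] := by
  induction l with
  | nil => simp [nzTail]
  | cons x t ih => simpa [nzTail] using ih

theorem allWins_nil_of_short {l : List Int} (h : l.length ≤ 3) : allWins l = [] := by
  match l, h with
  | [], _ => rfl
  | [_], _ => rfl
  | [_, _], _ => rfl
  | [_, _, _], _ => rfl

-- `rowBest` folds max over the 4-window products.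
theorem rowBest_eq (xs : List Int) (best : Int) :
    rowBest xs best = List.foldl max best (allWins xs) := by
  fun_induction rowBest xs best with
  | case1 a b c d t best p ih =>
      have hmax : (if a * b * c * d > best then a * b * c * d else best)
          = max best (a * b * c * d) := by omega
      simp only [rowBest, allWins, List.foldl_cons]
      rw [ih, hmax]
  | case2 xs best h =>
      rcases xs with _ | ⟨a, _ | ⟨b, _ | ⟨c, _ | ⟨d, t⟩⟩⟩⟩
      · rfl
      · rfl
      · rfl
      · rfl
      · exact absurd rfl (h a b c d t)

-- `winsFrom` enumerates exactly the windows of the whole list.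
theorem winsFrom_eq_allWins (s : List Int) : ∀ (w : List Int), w.length ≤ 4 →
    winsFrom w s = allWins ((if w.length = 4 then w.tail else w) ++ s) := by
  induction s with
  | nil =>
    intro w hw
    rw [winsFrom, List.append_nil, allWins_nil_of_short]
    split
    · simp [List.length_tail]; omega
    · omega
  | cons i s ih =>
    intro w hw
    simp only [winsFrom]
    set v := if w.length = 4 then w.tail else w with hv
    clear_value v
    have hvlen : v.length ≤ 3 := by
      rw [hv]; split
      · rename_i h4; simp [List.length_tail, h4]
      · rename_i h4; omega
    have hrec := ih (v ++ [i]) (by simp; omega)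
    by_cases h3 : v.length = 3
    · obtain ⟨a, b, c, rfl⟩ := List.length_eq_three.mp h3

      rw [if_pos (by simp), hrec, if_pos (by simp)]
      simp [allWins, List.prod_cons]
      ring
    · have h4 : (v ++ [i]).length ≠ 4 := by simp; omega
      rw [if_neg h4, hrec, if_neg h4]
      simp

-- Zero windows are absorbed by a nonnegative running maximum.
theorem winsFrom_eq_extWins (s : List Int) : ∀ (w : List Int) (m : Int), 0 ≤ m → w.length ≤ 4 →
    List.foldl max m (winsFrom w s) = List.foldl max m (extWins (nzTail w) s) := by
  induction s with
  | nil => intro w m _ _; rfl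
  | cons i s ih =>
    intro w m hm hw
    have hvlen : (if w.length = 4 then w.tail else w).length ≤ 3 := by
      split
      · rename_i h4; simp [List.length_tail, h4]
      · rename_i h4; omega
    simp only [winsFrom, extWins]
    by_cases hi : i = 0
    · subst hi
      rw [if_pos rfl]
      have hz : nzTail ((if w.length = 4 then w.tail else w) ++ [(0 : Int)]) = [] :=
        nzTail_append_zero _
      by_cases h4 : ((if w.length = 4 then w.tail else w) ++ [(0 : Int)]).length = 4
      · rw [if_pos h4]
        have hp0 : ((if w.length = 4 then w.tail else w) ++ [(0 : Int)]).prod = 0 :=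
          List.prod_eq_zero (by simp)
        simp only [hp0, List.singleton_append, List.foldl_cons]
        rw [max_eq_left hm, ih _ m hm (by simp; omega), hz]
      · rw [if_neg h4, List.nil_append, ih _ m hm (by simp; omega), hz]
    · rw [if_neg hi]
      have hsuf := nzTail_suffix w
      have hnz := nzTail_nonzero w
      have hC1 : nzTail ((if w.length = 4 then w.tail else w) ++ [i])
          = (if (nzTail w).length = 4 then (nzTail w).tail ++ [i] else nzTail w ++ [i]) := by
        by_cases h4 : (nzTail w).length = 4
        · have hwe : nzTail w = w := hsuf.eq_of_length (by have := hsuf.length_le; omega)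
          have hw4 : w.length = 4 := by rw [← hwe]; exact h4
          rw [if_pos h4, if_pos hw4, hwe]
          exact nzTail_eq_self (by
            intro h0
            rcases List.mem_append.mp h0 with h0 | h0
            · exact hnz 0 (by rw [hwe]; exact List.mem_of_mem_tail h0) rfl
            · simp at h0; exact hi h0.symm)
        · rw [if_neg h4, nzTail_append_nz hi]
          congr 1
          by_cases hw4 : w.length = 4
          · rw [if_pos hw4]
            have h0w : (0 : Int) ∈ w := by
              by_contra h0
              exact h4 (by rw [nzTail_eq_self h0]; exact hw4)
            rcases w with _ | ⟨x, t⟩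
            · simp at hw4
            · have hxt : x = 0 ∨ (0 : Int) ∈ t := by
                rcases (by simpa using h0w : 0 = x ∨ (0 : Int) ∈ t) with h | h
                · exact Or.inl h.symm
                · exact Or.inr h
              simp [nzTail, hxt]
          · rw [if_neg hw4]
      have hlen' : ((if w.length = 4 then w.tail else w) ++ [i]).length ≤ 4 := by simp; omega
      have hsuf' : (if (nzTail w).length = 4 then (nzTail w).tail ++ [i] else nzTail w ++ [i])
          <:+ ((if w.length = 4 then w.tail else w) ++ [i]) :=
        hC1 ▸ nzTail_suffix _
      have hlenle := hsuf'.length_le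
      by_cases hE : (if (nzTail w).length = 4 then (nzTail w).tail ++ [i]
          else nzTail w ++ [i]).length = 4
      · have h4 : ((if w.length = 4 then w.tail else w) ++ [i]).length = 4 := by omega
        have heq : (if (nzTail w).length = 4 then (nzTail w).tail ++ [i] else nzTail w ++ [i])
            = (if w.length = 4 then w.tail else w) ++ [i] :=
          hsuf'.eq_of_length (by omega)
        rw [if_pos h4, if_pos hE, heq]
        simp only [List.singleton_append, List.foldl_cons]
        rw [ih _ (max m (((if w.length = 4 then w.tail else w) ++ [i]).prod))
          (le_trans hm (le_max_left _ _)) hlen', hC1, heq]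
      · rw [if_neg hE]
        by_cases h4 : ((if w.length = 4 then w.tail else w) ++ [i]).length = 4
        · rw [if_pos h4]
          have h0 : (0 : Int) ∈ (if w.length = 4 then w.tail else w) ++ [i] := by
            by_contra h0
            have := nzTail_eq_self h0
            rw [hC1] at this
            rw [this] at hE
            exact hE h4
          have hp0 : ((if w.length = 4 then w.tail else w) ++ [i]).prod = 0 :=
            List.prod_eq_zero h0
          simp only [hp0, List.singleton_append, List.foldl_cons]
          rw [max_eq_left hm, List.nil_append, ih _ m hm hlen', hC1]
        · rw [if_neg h4, List.nil_append, List.nil_append, ih _ m hm hlen', hC1]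

-- Reading a known list element through Python indexing.
theorem pyGet?_of_getElem? {xs : List Int} {m : Nat} {y : Int} (h : xs[m]? = some y) :
    PySem.List.pyGet? xs (m : Int) = some y := by
  obtain ⟨hm, he⟩ := List.getElem?_eq_some_iff.mp h
  simp [PySem.List.pyGet?, PySem.List.pyIdx?, hm, he]

-- The four regimes of A's loop body.
theorem bpsStep_zero (xs : List Int) (k cp ic piv prod maxp : Int) :
    bpsStep xs k ⟨cp, ic, piv, prod, maxp⟩ 0 = ⟨0, ic + 1, piv, 1, maxp⟩ := by
  simp [bpsStep]

theorem bpsStep_start (xs : List Int) (ic piv prod maxp i : Int) (hi : i ≠ 0) :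
    bpsStep xs 4 ⟨0, ic, piv, prod, maxp⟩ i = ⟨1, ic + 1, ic, prod * i, maxp⟩ := by
  simp [bpsStep, hi]

theorem bpsStep_grow (xs : List Int) (cp ic piv prod maxp i : Int) (hi : i ≠ 0)
    (h0 : cp ≠ 0) (hlt : cp < 4) :
    bpsStep xs 4 ⟨cp, ic, piv, prod, maxp⟩ i
      = ⟨cp + 1, ic + 1, piv, prod * i,
          if cp + 1 = 4 then (if prod * i > maxp then prod * i else maxp) else maxp⟩ := by
  simp [bpsStep, hi, h0, hlt]

theorem bpsStep_full (xs : List Int) (ic piv prod maxp i : Int) (hi : i ≠ 0) :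
    bpsStep xs 4 ⟨4, ic, piv, prod, maxp⟩ i
      = ⟨4, ic + 1, piv + 1,
          PySem.Int.floordiv prod ((PySem.List.pyGet? xs piv).getD 1) * i,
          if PySem.Int.floordiv prod ((PySem.List.pyGet? xs piv).getD 1) * i > maxp then
            PySem.Int.floordiv prod ((PySem.List.pyGet? xs piv).getD 1) * i
          else maxp⟩ := by
  simp [bpsStep, hi]

-- Core invariant of A's loop: from a state describing pending zero-free window `w` at position
-- `n`, the loop's final maxProduct is maxp folded with the products of the remaining windows.
theorem coreA (xs : List Int) (s : List Int) : ∀ (w : List Int) (n : Nat) (piv maxp : Int),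
    (∀ x ∈ w, x ≠ 0) → w.length ≤ 4 → w.length ≤ n →
    xs.drop (n - w.length) = w ++ s →
    (w ≠ [] → piv = (n : Int) - w.length) →
    (List.foldl (bpsStep xs 4) ⟨(w.length : Int), (n : Int), piv, w.prod, maxp⟩ s).maxp
      = List.foldl max maxp (extWins w s) := by
  induction s with
  | nil => intro w n piv maxp _ _ _ _ _; rfl
  | cons i s ih =>
    intro w n piv maxp hnz hw4 hwn hdrop hpiv
    have hdn : xs.drop n = i :: s := by
      have h1 : (xs.drop (n - w.length)).drop w.length = xs.drop n := by
        rw [List.drop_drop]; congr 1; omega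
      rw [hdrop] at h1
      rw [List.drop_left] at h1
      exact h1.symm
    have hdn1 : xs.drop (n + 1) = s := by
      rw [← List.tail_drop, hdn]; rfl
    simp only [List.foldl_cons, extWins]
    by_cases hi : i = 0
    · subst hi
      rw [if_pos rfl]
      simp only [List.length_nil, Nat.cast_zero] at *
      rw [bpsStep_zero]
      have hih := ih [] (n + 1) piv maxp (by simp) (by simp) (by simp) (by simpa using hdn1)
        (by simp)
      simp only [List.length_nil, List.prod_nil, Nat.cast_zero, Nat.cast_add,
        Nat.cast_one] at hih
      exact hih
    · rw [if_neg hi]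
      rcases w with _ | ⟨wh, wt⟩
      · -- empty pending window: pivot is reset, first element of a new run
        simp only [List.length_nil, Nat.cast_zero, List.prod_nil]
        rw [bpsStep_start xs _ _ _ _ _ hi]
        have hih := ih [i] (n + 1) (n : Int) maxp
          (by intro x hx; simp at hx; rw [hx]; exact hi)
          (by simp) (by simp)
          (by simpa using hdn)
          (by intro _
              simp only [List.length_cons, List.length_nil]
              push_cast; omega)
        simp only [List.length_cons, List.length_nil, List.prod_cons, List.prod_nil,
          Nat.cast_add, Nat.cast_one, Nat.cast_zero, mul_one, zero_add, one_mul] at hih ⊢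
        norm_num at hih ⊢
        exact hih
      · have hpivv : piv = (n : Int) - (wh :: wt).length := hpiv (by simp)
        have hwhnz : wh ≠ 0 := hnz wh (by simp)
        have hwn' : wt.length + 1 ≤ n := by simpa using hwn
        by_cases hlt : wt.length < 3
        · -- growing window (counterProduct < k)
          rw [bpsStep_grow xs _ _ _ _ _ _ hi
            (by simp only [List.length_cons]; push_cast; omega)
            (by simp only [List.length_cons]; push_cast; omega)]
          have hih := ih ((wh :: wt) ++ [i]) (n + 1) piv
            (if ((wh :: wt).length : Int) + 1 = 4 then
              (if (wh :: wt).prod * i > maxp then (wh :: wt).prod * i else maxp) else maxp)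
            (by intro x hx
                rcases List.mem_append.mp hx with hx | hx
                · exact hnz x hx
                · simp at hx; rw [hx]; exact hi)
            (by simp only [List.length_append, List.length_cons, List.length_nil]; omega)
            (by simp only [List.length_append, List.length_cons, List.length_nil]; omega)
            (by have he : n + 1 - ((wh :: wt) ++ [i]).length = n - (wh :: wt).length := by
                  simp only [List.length_append, List.length_cons, List.length_nil]; omega
                rw [he, hdrop, List.append_assoc]; rfl)
            (by intro _
                rw [hpivv]
                simp only [List.length_append, List.length_cons, List.length_nil]
                push_cast; omega)
          by_cases h3 : wt.length = 2
          · simp only [h3, List.length_append, List.length_cons, List.length_nil,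
              List.prod_append, List.prod_cons, List.prod_nil, List.tail_cons,
              Nat.cast_ofNat, Nat.cast_add, Nat.cast_one, Nat.cast_zero, mul_one, one_mul,
              mul_assoc, List.nil_append, List.singleton_append] at hih ⊢
            norm_num at hih ⊢
            rw [if_pos (by omega : wt.length + 1 + 1 = 4)]
            simp only [List.foldl_cons, List.foldl_nil]
            rw [show max maxp (wh * (wt.prod * i))
                = (if maxp < wh * (wt.prod * i) then wh * (wt.prod * i) else maxp) from by
                omega]
            exact hih
          · have e0 : wt.length + 1 ≠ 4 := by omega
            have e1 : wt.length + 1 + 1 ≠ 4 := by omega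
            have e2 : ¬((wt.length : Int) + 1 + 1 = 4) := by push_cast; omega
            simp only [List.length_append, List.length_cons, List.length_nil,
              List.prod_append, List.prod_cons, List.prod_nil, Nat.cast_add, Nat.cast_one,
              Nat.cast_zero, mul_one, one_mul, mul_assoc, zero_add, add_zero, e2] at hih
            simp only [e0, e1, e2, List.length_append, List.length_cons, List.length_nil,
              List.prod_append, List.prod_cons, List.prod_nil, Nat.cast_add, Nat.cast_one,
              Nat.cast_zero, mul_one, one_mul, mul_assoc, zero_add, add_zero,
              List.nil_append, if_false]
            exact hih
        · -- full window (counterProduct == k): divide out the pivot, multiply the new element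
          have hwt3 : wt.length = 3 := by
            simp only [List.length_cons] at hw4; omega
          have hn4 : 4 ≤ n := by omega
          have hcast : (((wh :: wt).length : Nat) : Int) = 4 := by
            simp only [List.length_cons, hwt3]; norm_num
          rw [hcast, bpsStep_full xs _ _ _ _ _ hi]
          have hget : PySem.List.pyGet? xs piv = some wh := by
            rw [hpivv, hcast,
              show ((n : Int) - 4) = ((n - 4 : Nat) : Int) from by push_cast; omega]
            apply pyGet?_of_getElem?
            have h0 : (xs.drop (n - 4))[0]? = some wh := by
              rw [show n - 4 = n - (wh :: wt).length from by
                    simp only [List.length_cons]; omega, hdrop]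
              rfl
            rw [List.getElem?_drop] at h0
            simpa using h0
          have hfd : PySem.Int.floordiv ((wh :: wt).prod)
              ((PySem.List.pyGet? xs piv).getD 1) = wt.prod := by
            rw [hget, Option.getD_some, List.prod_cons]
            exact Int.mul_fdiv_cancel_left _ hwhnz
          rw [hfd]
          have hih := ih (wt ++ [i]) (n + 1) (piv + 1) (max maxp (wt.prod * i))
            (by intro x hx
                rcases List.mem_append.mp hx with hx | hx
                · exact hnz x (List.mem_cons_of_mem _ hx)
                · simp at hx; rw [hx]; exact hi)
            (by simp only [List.length_append, List.length_cons, List.length_nil]; omega)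
            (by simp only [List.length_append, List.length_cons, List.length_nil]; omega)
            (by have he : n + 1 - (wt ++ [i]).length = n - (wh :: wt).length + 1 := by
                  simp only [List.length_append, List.length_cons, List.length_nil]; omega
                rw [he, ← List.tail_drop, hdrop]
                simp)
            (by intro _
                rw [hpivv, hcast]
                simp only [List.length_append, List.length_cons, List.length_nil, hwt3]
                push_cast; omega)
          simp only [List.length_append, List.length_cons, List.length_nil,
            List.prod_append, List.prod_cons, List.prod_nil, Nat.cast_add, Nat.cast_one,
            Nat.cast_zero, mul_one, one_mul, hwt3] at hih
          rw [if_pos (by simp only [List.length_cons]; omega : (wh :: wt).length = 4)]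
          rw [if_pos (by simp only [List.length_append, List.length_cons, List.length_nil,
                List.tail_cons, hwt3] : ((wh :: wt).tail ++ [i]).length = 4)]
          simp only [List.tail_cons, List.singleton_append, List.foldl_cons]
          rw [show (if wt.prod * i > maxp then wt.prod * i else maxp)
              = max maxp (wt.prod * i) from by omega]
          rw [show (wt ++ [i]).prod = wt.prod * i from by
              simp [List.prod_append, List.prod_cons]]
          exact hih

theorem bps_eq (xs : List Int) :
    biggestProductSeries xs 4 = List.foldl max 0 (extWins [] xs) := by
  have := coreA xs xs [] 0 0 0 (by simp) (by simp) (by simp) (by simp) (by simp)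
  simpa [biggestProductSeries] using this

theorem rowBest_eq_A (space : List Int) (p : Int) (hp : 0 ≤ p) :
    (if (space.length : Int) ≥ 4 then
      (if biggestProductSeries space 4 > p then biggestProductSeries space 4 else p)
     else p) = rowBest space p := by
  rw [rowBest_eq]
  have hwf : List.foldl max p (allWins space) = List.foldl max p (winsFrom [] space) := by
    rw [winsFrom_eq_allWins space [] (by simp)]; simp
  by_cases h : (space.length : Int) ≥ 4
  · rw [if_pos h, bps_eq, hwf, winsFrom_eq_extWins space [] p hp (by simp)]
    simp only [nzTail]
    have : List.foldl max p (extWins [] space) = max p (List.foldl max 0 (extWins [] space)) := by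
      rw [← List.foldl_assoc (op := max), max_eq_left hp]
    rw [this]
    omega
  · rw [if_neg h]
    rw [allWins_nil_of_short (by omega)]
    rfl

theorem bps_nonneg (xs : List Int) : 0 ≤ biggestProductSeries xs 4 := by
  rw [bps_eq]
  exact (PySem.List.le_foldl_max (extWins [] xs) 0).1

theorem outer_eq (rows : List (List Int)) : ∀ (p : Int), 0 ≤ p →
    List.foldl (fun product space =>
      if (space.length : Int) ≥ 4 then
        (if biggestProductSeries space 4 > product then biggestProductSeries space 4 else product)
      else product) p rows
    = List.foldl (fun best space => rowBest space best) p rows := by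
  induction rows with
  | nil => intro p _; rfl
  | cons space rows ih =>
    intro p hp
    simp only [List.foldl_cons]
    rw [← rowBest_eq_A space p hp]
    apply ih
    have := bps_nonneg space
    split_ifs <;> omega

-- ===== VERDICT (by name: the statement is the Claim_ definition above) =====
theorem LargestProductGrid_spec : Claim_equal_LargestProductGrid := by
  intro searchSpace _
  unfold Spec_LargestProductGrid LargestProductGrid LargestProductGrid_alt
  exact outer_eq searchSpace 0 le_rfl
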